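-- pv_equiv track=rewrite | github.com/seungbin-lee0330/2021 | programmers_coding_test/72410.py | solution
-- ===== SOURCE A (Python) =====
-- def solution(new_id): #문자열은 리스트 함수 사용한 수정이 안되고 슬라이싱으로 새롭게 정의해주는게 좋다
--     answer = ''
--     #1
--     new_id = new_id.lower() # .lower()는 원본에 영향을 미치지 않는다
--     #2
--     for c in new_id:
--         if c.isalpha() or c.isdigit() or c in ['-','_','.']:
--             answer += c
--     #3
--     while '..' in answer: # 생각하기 어렵다 아니면 리스트로 바꿔서 적당히 손봐줘야 할듯
--         answer = answer.replace('..', '.')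
--     #4
--     if len(answer) > 1:
--         if answer[0] == '.':
--             answer = answer[1:]
--         if answer[-1] == '.':
--             answer = answer[:-1]
--     else:
--         if answer == '.':
--             answer = ''
--     #5
--     if answer == '':
--         answer = 'a'
--     #6
--     if len(answer) > 15:
--         answer = answer[:15]
--         if answer[-1] == '.':
--             answer = answer[:-1]
--     #7
--     while len(answer) < 3:
--         answer += answer[-1]
--     return answer
-- ===== SOURCE B (Python) =====
-- def solution(new_id):
--     # one pass: lowercase+filter+collapse dots (skip '.' if nothing kept yet or last kept is '.'),
--     # which also strips leading dots; then fix the tail, pad/truncate.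
--     out = []
--     for c in new_id.lower():
--         if c.isalpha() or c.isdigit() or c in '-_':
--             out.append(c)
--         elif c == '.' and out and out[-1] != '.':
--             out.append(c)
--     s = ''.join(out)
--     if s.endswith('.'):
--         s = s[:-1]
--     if not s:
--         s = 'a'
--     s = s[:15]
--     if s.endswith('.'):
--         s = s[:-1]
--     return s if len(s) >= 3 else s + s[-1] * (3 - len(s))
-- ===== Notes on version B (the rewrite author's own statement) =====
-- stated objective: alternative
-- what changed: Replaces filter-then-repeated-replace-until-no-double-dot plus conditional leading/trailing dot strips with a single fused pass that lowercases, filters and collapses/strips dots by checking the last kept character, followed by straight-line tail fixes and a closed-form pad instead of a while loop.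
import Mathlib
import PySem

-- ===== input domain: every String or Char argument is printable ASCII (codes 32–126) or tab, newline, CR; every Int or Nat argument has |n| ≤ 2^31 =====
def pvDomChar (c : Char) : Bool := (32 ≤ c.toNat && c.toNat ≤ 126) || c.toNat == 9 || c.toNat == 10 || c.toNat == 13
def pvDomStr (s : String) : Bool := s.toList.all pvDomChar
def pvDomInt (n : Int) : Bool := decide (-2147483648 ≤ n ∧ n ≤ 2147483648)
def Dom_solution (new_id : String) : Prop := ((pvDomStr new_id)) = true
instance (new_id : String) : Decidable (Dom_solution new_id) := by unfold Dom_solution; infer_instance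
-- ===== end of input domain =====

-- B replaces A's filter-then-repeated-replace-until-no-double-dot (plus conditional dot
-- strips and a padding while-loop) by one fused pass that filters and collapses/strips dots
-- by looking at the last kept character, plus straight-line tail fixes; objective: alternative.

-- ===== PORT A =====
-- c.isalpha() or c.isdigit() or c in ['-','_','.']
def pvAllowedA (c : Char) : Bool :=
  PySem.Chars.isalpha c || PySem.Chars.isdigit c || ['-', '_', '.'].contains c

-- answer.replace('..','.') : leftmost non-overlapping scan; ported by hand for this fixed
-- pattern (exact: matches CPython str.replace for old='..', new='.') so that the while
-- loop's termination is provable.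
def pvReplDD : List Char → List Char
  | [] => []
  | [c] => [c]
  | c :: d :: r => if c = '.' ∧ d = '.' then '.' :: pvReplDD r else c :: pvReplDD (d :: r)

-- '..' in answer : ported by hand for this fixed pattern (exact substring test)
def pvHasDD : List Char → Bool
  | c :: d :: r => (decide (c = '.' ∧ d = '.')) || pvHasDD (d :: r)
  | _ => false

-- termination measure for A's while loop (each replace pass shortens the string)
lemma pvReplDD_length_le : ∀ s : List Char, (pvReplDD s).length ≤ s.length := by
  intro s
  fun_induction pvReplDD s <;> simp_all <;> omega

lemma pvReplDD_length_lt : ∀ s : List Char, pvHasDD s = true → (pvReplDD s).length < s.length := by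
  intro s
  fun_induction pvReplDD s with
  | case1 => simp [pvHasDD]
  | case2 c => simp [pvHasDD]
  | case3 c d r h ih =>
    intro _
    have := pvReplDD_length_le r
    simp_all
  | case4 c d r h ih =>
    intro hdd
    have : pvHasDD (d :: r) = true := by
      simp only [pvHasDD, Bool.or_eq_true, decide_eq_true_eq] at hdd
      rcases hdd with h' | h'
      · exact absurd h' h
      · exact h'
    have := ih this
    simp_all

-- while '..' in answer: answer = answer.replace('..', '.')
def pvLoop3 (s : List Char) : List Char :=
  if h : pvHasDD s = true then pvLoop3 (pvReplDD s) else s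
termination_by s.length
decreasing_by exact pvReplDD_length_lt s h

-- while len(answer) < 3: answer += answer[-1]
def pvPad (a : List Char) : List Char :=
  if h : a.length < 3 then
    match PySem.List.pyGet? a (-1) with
    | some c => pvPad (a ++ [c])
    | none => a  -- never reached by A (answer is nonempty at step 7; Python would raise)
  else a
termination_by 3 - a.length
decreasing_by simp; omega

def solution (new_id : String) : String :=
  -- answer = ''   /  #1: new_id = new_id.lower()
  let lowered := PySem.Str.lower new_id
  -- #2: for c in new_id: if …: answer += c
  let answer := lowered.toList.foldl (fun acc c => if pvAllowedA c then acc ++ [c] else acc) []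
  -- #3: while '..' in answer: answer = answer.replace('..', '.')
  let answer := pvLoop3 answer
  -- #4
  let answer :=
    if 1 < answer.length then
      let answer := if PySem.List.pyGet? answer 0 = some '.' then PySem.List.slice answer (some 1) none else answer
      if PySem.List.pyGet? answer (-1) = some '.' then PySem.List.slice answer none (some (-1)) else answer
    else
      if answer = ['.'] then [] else answer
  -- #5
  let answer := if answer = [] then ['a'] else answer
  -- #6
  let answer :=
    if 15 < answer.length then
      let answer := PySem.List.slice answer none (some 15)
      if PySem.List.pyGet? answer (-1) = some '.' then PySem.List.slice answer none (some (-1)) else answer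
    else answer
  -- #7
  String.ofList (pvPad answer)

-- ===== PORT B =====
def solution_alt (new_id : String) : String :=
  -- out = [];  for c in new_id.lower(): …append…
  let out := (PySem.Str.lower new_id).toList.foldl
    (fun out c =>
      if PySem.Chars.isalpha c || PySem.Chars.isdigit c || ['-', '_'].contains c then out ++ [c]
      else if c = '.' ∧ out ≠ [] ∧ PySem.List.pyGet? out (-1) ≠ some '.' then out ++ [c]
      else out) []
  -- s = ''.join(out)  (a list of single chars joined: the same char list)
  let s := out
  -- if s.endswith('.'): s = s[:-1]
  let s := if PySem.Chars.endswith s ['.'] then PySem.List.slice s none (some (-1)) else s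
  -- if not s: s = 'a'
  let s := if s = [] then ['a'] else s
  -- s = s[:15]
  let s := PySem.List.slice s none (some 15)
  -- if s.endswith('.'): s = s[:-1]
  let s := if PySem.Chars.endswith s ['.'] then PySem.List.slice s none (some (-1)) else s
  -- return s if len(s) >= 3 else s + s[-1] * (3 - len(s))
  if 3 ≤ s.length then String.ofList s
  else
    match PySem.List.pyGet? s (-1) with
    | some c => String.ofList (s ++ List.replicate (3 - s.length) c)  -- s[-1] * (3 - len(s))
    | none => String.ofList s  -- never reached by B (s is nonempty here; Python would raise)

-- ===== PRECONDITION & SPEC =====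
def Spec_solution (new_id : String) (out : String) : Prop := out = solution_alt new_id
instance (new_id : String) (out : String) : Decidable (Spec_solution new_id out) := by unfold Spec_solution; infer_instance

-- ===== CLAIM (what is proved, stated in full; the proofs are below) =====
def Claim_equal_solution : Prop := ∀ (new_id : String), Dom_solution new_id → Spec_solution new_id (solution new_id)

-- ===== LEMMAS AND PROOFS =====

-- dot-collapsing state machine: b = "the previous kept character is a dot (or we are
-- before the first kept character, for b = true at the start)"
def pvCol : Bool → List Char → List Char
  | _, [] => []
  | b, c :: cs => if c = '.' then (if b then pvCol b cs else '.' :: pvCol true cs) else c :: pvCol false cs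

def pvDropLead (xs : List Char) : List Char := if xs.head? = some '.' then xs.tail else xs
def pvDropTrail (xs : List Char) : List Char := if xs.getLast? = some '.' then xs.dropLast else xs

lemma pvFoldl_filter (l : List Char) (acc : List Char) :
    l.foldl (fun acc c => if pvAllowedA c then acc ++ [c] else acc) acc = acc ++ l.filter pvAllowedA := by
  induction l generalizing acc with
  | nil => simp
  | cons c cs ih => by_cases h : pvAllowedA c <;> simp [h, ih]

lemma pvHasDD_cons (c : Char) (xs : List Char) :
    pvHasDD (c :: xs) = (((decide (c = '.')) && (decide (xs.head? = some '.'))) || pvHasDD xs) := by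
  cases xs <;> simp [pvHasDD]

lemma pvCol_replDD (t : List Char) : ∀ b, pvCol b (pvReplDD t) = pvCol b t := by
  fun_induction pvReplDD t with
  | case1 => intro b; rfl
  | case2 c => intro b; rfl
  | case3 c d r h ih =>
    intro b
    obtain ⟨hc, hd⟩ := h
    subst hc hd
    cases b <;> simp [pvCol, ih]
  | case4 c d r h ih =>
    intro b
    by_cases hc : c = '.'
    · subst hc
      cases b <;> simp [pvCol, ih]
    · simp [pvCol, hc, ih]

lemma pvCol_fix (t : List Char) (h : pvHasDD t = false) :
    pvCol false t = t ∧ (t.head? ≠ some '.' → pvCol true t = t) := by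
  induction t with
  | nil => simp [pvCol]
  | cons c cs ih =>
    rw [pvHasDD_cons] at h
    simp only [Bool.or_eq_false_iff, Bool.and_eq_false_iff] at h
    obtain ⟨h1, h2⟩ := h
    have ihr := ih h2
    constructor
    · by_cases hc : c = '.'
      · subst hc
        have hhd : cs.head? ≠ some '.' := by
          rcases h1 with h' | h'
          · simp at h'
          · simpa using h'
        simp [pvCol, ihr.2 hhd]
      · simp [pvCol, hc, ihr.1]
    · intro hhd
      have hc : c ≠ '.' := by simpa using hhd
      simp [pvCol, hc, ihr.1]

lemma pvLoop3_eq_col (t : List Char) : pvLoop3 t = pvCol false t := by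
  fun_induction pvLoop3 t with
  | case1 t h ih => rw [ih, pvCol_replDD]
  | case2 t h =>
    have := pvCol_fix t (by simpa using h)
    exact this.1.symm

lemma pvHead_col_true (t : List Char) : (pvCol true t).head? ≠ some '.' := by
  induction t with
  | nil => simp [pvCol]
  | cons c cs ih =>
    by_cases hc : c = '.'
    · subst hc; simpa [pvCol] using ih
    · simp [pvCol, hc, hc]

lemma pvHasDD_col (t : List Char) : ∀ b, pvHasDD (pvCol b t) = false := by
  induction t with
  | nil => intro b; simp [pvCol, pvHasDD]
  | cons c cs ih =>
    intro b
    by_cases hc : c = '.'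
    · subst hc
      cases b with
      | true => simpa [pvCol] using ih true
      | false =>
        have hdef : pvCol false ('.' :: cs) = '.' :: pvCol true cs := by simp [pvCol]
        rw [hdef, pvHasDD_cons]
        have h1 := pvHead_col_true cs
        have h2 := ih true
        simp [h1, h2]
    · have hdef : pvCol b (c :: cs) = c :: pvCol false cs := by simp [pvCol, hc]
      rw [hdef, pvHasDD_cons]
      simp [hc, ih false]

lemma pvCol_true_eq (t : List Char) : pvCol true t = pvDropLead (pvCol false t) := by
  cases t with
  | nil => rfl
  | cons c cs =>
    by_cases hc : c = '.'
    · subst hc; simp [pvCol, pvDropLead]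
    · simp [pvCol, hc, pvDropLead]

-- the fused loop of B computes pvCol over the filtered list
lemma pvAllowedA_dot : pvAllowedA '.' = true := by decide

lemma pvFoldlB (l : List Char) : ∀ out : List Char,
    l.foldl (fun out c =>
      if PySem.Chars.isalpha c || PySem.Chars.isdigit c || ['-', '_'].contains c then out ++ [c]
      else if c = '.' ∧ out ≠ [] ∧ PySem.List.pyGet? out (-1) ≠ some '.' then out ++ [c]
      else out) out
    = out ++ pvCol (out.isEmpty || decide (out.getLast? = some '.')) (l.filter pvAllowedA) := by
  induction l with
  | nil => intro out; simp [pvCol]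
  | cons c cs ih =>
    intro out
    rw [List.foldl_cons]
    by_cases hA : pvAllowedA c = true
    · rw [List.filter_cons, if_pos hA]
      by_cases hc : c = '.'
      · subst hc
        have hfirst : ¬ ((PySem.Chars.isalpha '.' || PySem.Chars.isdigit '.' || ['-', '_'].contains '.') = true) := by decide
        rw [if_neg hfirst]
        by_cases hb : (out.isEmpty || decide (out.getLast? = some '.')) = true
        · -- skip the dot; pvCol true skips it too
          have hcond : ¬ (('.' : Char) = '.' ∧ out ≠ [] ∧ PySem.List.pyGet? out (-1) ≠ some '.') := by
            simp only [Bool.or_eq_true, List.isEmpty_iff, decide_eq_true_eq] at hb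
            rcases hb with h' | h'
            · rintro ⟨_, hne, _⟩; exact hne h'
            · rintro ⟨_, _, hg⟩
              rw [PySem.List.pyGet?_neg_one] at hg
              exact hg h'
          rw [if_neg hcond, ih out, hb]
          have hcol : pvCol true ('.' :: List.filter pvAllowedA cs) = pvCol true (List.filter pvAllowedA cs) := by
            simp [pvCol]
          rw [hcol]
        · -- append the dot; pvCol false emits one dot and flips the flag
          have hbe : out ≠ [] ∧ ¬ (out.getLast? = some '.') := by
            simp only [Bool.or_eq_true, List.isEmpty_iff, decide_eq_true_eq, not_or] at hb
            exact ⟨hb.1, hb.2⟩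
          have hcond : (('.' : Char) = '.' ∧ out ≠ [] ∧ PySem.List.pyGet? out (-1) ≠ some '.') := by
            refine ⟨rfl, hbe.1, ?_⟩
            rw [PySem.List.pyGet?_neg_one]
            exact hbe.2
          rw [if_pos hcond, ih (out ++ ['.'])]
          have hflag : ((out ++ ['.']).isEmpty || decide ((out ++ ['.']).getLast? = some '.')) = true := by
            simp
          rw [hflag, Bool.eq_false_iff.mpr hb]
          have hcol : pvCol false ('.' :: List.filter pvAllowedA cs) = '.' :: pvCol true (List.filter pvAllowedA cs) := by
            simp [pvCol]
          rw [hcol]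
          simp
      · -- an allowed non-dot character: both append it
        have hfirst : (PySem.Chars.isalpha c || PySem.Chars.isdigit c || ['-', '_'].contains c) = true := by
          simp only [pvAllowedA, Bool.or_eq_true] at hA
          rcases hA with (h' | h') | h'
          · simp [h']
          · simp [h']
          · simp only [List.contains_eq_mem, List.mem_cons, List.mem_singleton,
              List.not_mem_nil, or_false, decide_eq_true_eq] at h'
            rcases h' with h' | h' | h'
            · simp [h']
            · simp [h']
            · exact absurd h' hc
        rw [if_pos hfirst, ih (out ++ [c])]
        have hflag : ((out ++ [c]).isEmpty || decide ((out ++ [c]).getLast? = some '.')) = false := by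
          simp [hc]
        rw [hflag]
        have hcol : pvCol (out.isEmpty || decide (out.getLast? = some '.')) (c :: List.filter pvAllowedA cs)
            = c :: pvCol false (List.filter pvAllowedA cs) := by
          simp [pvCol, hc]
        rw [hcol]
        simp
    · -- a dropped character: both skip
      rw [List.filter_cons, if_neg hA]
      have hfirst : ¬ ((PySem.Chars.isalpha c || PySem.Chars.isdigit c || ['-', '_'].contains c) = true) := by
        intro h'
        apply hA
        simp only [Bool.or_eq_true] at h' ⊢
        unfold pvAllowedA
        simp only [Bool.or_eq_true]
        rcases h' with (h' | h') | h'
        · exact Or.inl (Or.inl h')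
        · exact Or.inl (Or.inr h')
        · right
          simp only [List.contains_eq_mem, List.mem_cons, List.not_mem_nil, or_false,
            decide_eq_true_eq] at h' ⊢
          rcases h' with h' | h'
          · exact Or.inl h'
          · exact Or.inr (Or.inl h')
      have hdot : ¬ (c = '.' ∧ out ≠ [] ∧ PySem.List.pyGet? out (-1) ≠ some '.') := by
        rintro ⟨hc, _, _⟩
        subst hc
        exact hA pvAllowedA_dot
      rw [if_neg hfirst, if_neg hdot, ih out]

lemma pvPyGet0 (xs : List Char) : PySem.List.pyGet? xs 0 = xs.head? := by
  cases xs
  · simp [PySem.List.pyGet?]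
  · rw [PySem.List.pyGet?_zero_cons]; rfl

lemma pvSlice15 (xs : List Char) : PySem.List.slice xs none (some 15) = xs.take 15 := by
  rw [PySem.List.slice_to (xs := xs) (b := 15) (by norm_num)]
  have : Int.toNat 15 = 15 := rfl
  rw [this]

lemma pvEndswith_dot (s : List Char) :
    PySem.Chars.endswith s ['.'] = decide (s.getLast? = some '.') := by
  by_cases h : s.getLast? = some '.'
  · obtain ⟨l', rfl⟩ := List.getLast?_eq_some_iff.mp h
    have hsuf : ['.'] <:+ l' ++ ['.'] := ⟨l', rfl⟩
    rw [(PySem.Chars.endswith_iff _ _).mpr hsuf, h]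
    simp
  · have hsuf : ¬ (['.'] <:+ s) := by
      rintro ⟨l', rfl⟩
      simp at h
    have hf : PySem.Chars.endswith s ['.'] = false := by
      cases he : PySem.Chars.endswith s ['.']
      · rfl
      · exact absurd ((PySem.Chars.endswith_iff _ _).mp he) hsuf
    rw [hf]
    simp [h]

lemma pvStep4_eq (a : List Char) :
    (if 1 < a.length then
      let a' := if PySem.List.pyGet? a 0 = some '.' then PySem.List.slice a (some 1) none else a
      if PySem.List.pyGet? a' (-1) = some '.' then PySem.List.slice a' none (some (-1)) else a'
    else if a = ['.'] then [] else a)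
    = pvDropTrail (pvDropLead a) := by
  match a with
  | [] => simp [pvDropLead, pvDropTrail]
  | [c] =>
    by_cases hc : c = '.'
    · subst hc; simp [pvDropLead, pvDropTrail]
    · simp [pvDropLead, pvDropTrail, hc]
  | x :: y :: r =>
    have hlen : 1 < (x :: y :: r).length := by simp
    rw [if_pos hlen]
    simp only [pvPyGet0, PySem.List.pyGet?_neg_one, PySem.List.slice_from_one,
      PySem.List.slice_to_neg_one, pvDropLead, pvDropTrail]

lemma pvHasDD_tail (xs : List Char) (h : pvHasDD xs = false) : pvHasDD xs.tail = false := by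
  cases xs with
  | nil => simpa using h
  | cons c cs =>
    rw [pvHasDD_cons] at h
    simp only [Bool.or_eq_false_iff] at h
    simpa using h.2

lemma pvHasDD_append_ddot (y : List Char) : pvHasDD (y ++ ['.', '.']) = true := by
  induction y with
  | nil => decide
  | cons c cs ih => rw [List.cons_append, pvHasDD_cons, ih]; simp

lemma pvDropTrail_last (x : List Char) (h : pvHasDD x = false) :
    (pvDropTrail x).getLast? ≠ some '.' := by
  unfold pvDropTrail
  by_cases hl : x.getLast? = some '.'
  · rw [if_pos hl]
    intro hd
    obtain ⟨z, rfl⟩ := List.getLast?_eq_some_iff.mp hl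
    rw [List.dropLast_concat] at hd
    obtain ⟨y, rfl⟩ := List.getLast?_eq_some_iff.mp hd
    have h2 : pvHasDD (y ++ ['.', '.']) = false := by
      simpa [List.append_assoc] using h
    rw [pvHasDD_append_ddot] at h2
    exact Bool.noConfusion h2
  · rw [if_neg hl]
    exact hl

lemma pvDropLead_noDD (x : List Char) (h : pvHasDD x = false) : pvHasDD (pvDropLead x) = false := by
  unfold pvDropLead
  split
  · exact pvHasDD_tail x h
  · exact h

lemma pvDropTrail_take_ne_nil (x : List Char) (hne : x ≠ []) (hlast : x.getLast? ≠ some '.') :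
    pvDropTrail (x.take 15) ≠ [] := by
  rcases x with _ | ⟨c, cs⟩
  · exact absurd rfl hne
  rcases cs with _ | ⟨d, r⟩
  · have hc : c ≠ '.' := by simpa using hlast
    simp [pvDropTrail, hc]
  · have hlen2 : 2 ≤ ((c :: d :: r).take 15).length := by
      simp [List.length_take]
    unfold pvDropTrail
    split
    · intro hnil
      have hlen := congrArg List.length hnil
      rw [List.length_dropLast] at hlen
      simp only [List.length_nil] at hlen
      omega
    · intro hnil
      have hlen := congrArg List.length hnil
      simp only [List.length_nil] at hlen
      omega

lemma pvPad_eq (x : List Char) (hne : x ≠ []) :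
    pvPad x = (if 3 ≤ x.length then x
      else match PySem.List.pyGet? x (-1) with
        | some c => x ++ List.replicate (3 - x.length) c
        | none => x) := by
  match x, hne with
  | [a], _ =>
    have e1 : pvPad [a] = pvPad [a, a] := by
      rw [pvPad.eq_def]
      simp [PySem.List.pyGet?_neg_one]
    have e2 : pvPad [a, a] = pvPad [a, a, a] := by
      rw [pvPad.eq_def]
      simp [PySem.List.pyGet?_neg_one]
    have e3 : pvPad [a, a, a] = [a, a, a] := by
      rw [pvPad.eq_def]
      simp
    rw [e1, e2, e3]
    simp [PySem.List.pyGet?_neg_one, List.replicate_succ]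
  | [a, b], _ =>
    have e1 : pvPad [a, b] = pvPad [a, b, b] := by
      rw [pvPad.eq_def]
      simp [PySem.List.pyGet?_neg_one]
    have e2 : pvPad [a, b, b] = [a, b, b] := by
      rw [pvPad.eq_def]
      simp
    rw [e1, e2]
    simp [PySem.List.pyGet?_neg_one, List.replicate_succ]
  | a :: b :: c :: r, _ =>
    rw [pvPad.eq_def, dif_neg (by simp)]
    rw [if_pos (by simp)]

-- the whole pipeline, at the list level, for an arbitrary lowered character list
lemma pvMain (l : List Char) :
    (let answer := l.foldl (fun acc c => if pvAllowedA c then acc ++ [c] else acc) []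
     let answer := pvLoop3 answer
     let answer :=
       if 1 < answer.length then
         let answer := if PySem.List.pyGet? answer 0 = some '.' then PySem.List.slice answer (some 1) none else answer
         if PySem.List.pyGet? answer (-1) = some '.' then PySem.List.slice answer none (some (-1)) else answer
       else if answer = ['.'] then [] else answer
     let answer := if answer = [] then ['a'] else answer
     let answer :=
       if 15 < answer.length then
         let answer := PySem.List.slice answer none (some 15)
         if PySem.List.pyGet? answer (-1) = some '.' then PySem.List.slice answer none (some (-1)) else answer
       else answer
     String.ofList (pvPad answer))
    = (let out := l.foldl
        (fun out c =>
          if PySem.Chars.isalpha c || PySem.Chars.isdigit c || ['-', '_'].contains c then out ++ [c]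
          else if c = '.' ∧ out ≠ [] ∧ PySem.List.pyGet? out (-1) ≠ some '.' then out ++ [c]
          else out) []
       let s := out
       let s := if PySem.Chars.endswith s ['.'] then PySem.List.slice s none (some (-1)) else s
       let s := if s = [] then ['a'] else s
       let s := PySem.List.slice s none (some 15)
       let s := if PySem.Chars.endswith s ['.'] then PySem.List.slice s none (some (-1)) else s
       if 3 ≤ s.length then String.ofList s
       else
         match PySem.List.pyGet? s (-1) with
         | some c => String.ofList (s ++ List.replicate (3 - s.length) c)
         | none => String.ofList s) := by
  simp only [pvFoldl_filter, pvFoldlB, List.nil_append, pvLoop3_eq_col, pvStep4_eq,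
    List.isEmpty_nil, Bool.true_or, pvCol_true_eq]
  simp only [pvEndswith_dot, decide_eq_true_eq, PySem.List.slice_to_neg_one, pvSlice15,
    PySem.List.pyGet?_neg_one]
  have hfold : ∀ s : List Char, (if s.getLast? = some '.' then s.dropLast else s) = pvDropTrail s :=
    fun s => rfl
  simp only [hfold]
  have hvlast : (pvDropTrail (pvDropLead (pvCol false (List.filter pvAllowedA l)))).getLast? ≠ some '.' :=
    pvDropTrail_last _ (pvDropLead_noDD _ (pvHasDD_col _ false))
  set v := pvDropTrail (pvDropLead (pvCol false (List.filter pvAllowedA l))) with hv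
  set w := (if v = [] then ['a'] else v) with hw
  have hwne : w ≠ [] := by
    rw [hw]
    split
    · simp
    · assumption
  have hwlast : w.getLast? ≠ some '.' := by
    rw [hw]
    split
    · simp
    · exact hvlast
  have hA6 : (if 15 < w.length then pvDropTrail (w.take 15) else w) = pvDropTrail (w.take 15) := by
    split
    · rfl
    · rw [List.take_of_length_le (by omega)]
      unfold pvDropTrail
      rw [if_neg hwlast]
  rw [hA6]
  have hyne : pvDropTrail (w.take 15) ≠ [] := pvDropTrail_take_ne_nil w hwne hwlast
  rw [pvPad_eq _ hyne]
  simp only [PySem.List.pyGet?_neg_one]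
  by_cases h3 : 3 ≤ (pvDropTrail (w.take 15)).length
  · rw [if_pos h3, if_pos h3]
  · rw [if_neg h3, if_neg h3]
    cases hg : (pvDropTrail (w.take 15)).getLast? <;> rfl

-- ===== VERDICT (by name: the statement is the Claim_ definition above) =====
theorem solution_spec : Claim_equal_solution := by
  intro new_id _
  unfold Spec_solution solution solution_alt
  exact pvMain (PySem.Str.lower new_id).toList
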